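-- pv_equiv track=rewrite | github.com/nikcabe/TIL | swea/4366 - 정식이의 은행업무.py | tbin
-- ===== SOURCE A (Python) =====
-- def tbin(tbin_num):
--     result = 0
--     if tbin_num[0] != 0:
--         for l in range(len(tbin_num)):
--             if tbin_num[l] == 1:
--                 result += 3 ** (len(tbin_num) - l-1)
--             elif tbin_num[l] == 2 :
--                 result += 2 * 3 ** (len(tbin_num) - l-1)
--     return result
-- ===== SOURCE B (Python) =====
-- def tbin(tbin_num):
--     if tbin_num[0] == 0:
--         return 0
--     result = 0
--     for d in tbin_num:
--         result = result * 3 + (d if d in (1, 2) else 0)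
--     return result
-- ===== Notes on version B (the rewrite author's own statement) =====
-- stated objective: alternative
-- what changed: Replaces the per-digit 3**(len-l-1) power sum with a single Horner pass (result = result*3 + digit), keeping the leading-zero guard.
import Mathlib
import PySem

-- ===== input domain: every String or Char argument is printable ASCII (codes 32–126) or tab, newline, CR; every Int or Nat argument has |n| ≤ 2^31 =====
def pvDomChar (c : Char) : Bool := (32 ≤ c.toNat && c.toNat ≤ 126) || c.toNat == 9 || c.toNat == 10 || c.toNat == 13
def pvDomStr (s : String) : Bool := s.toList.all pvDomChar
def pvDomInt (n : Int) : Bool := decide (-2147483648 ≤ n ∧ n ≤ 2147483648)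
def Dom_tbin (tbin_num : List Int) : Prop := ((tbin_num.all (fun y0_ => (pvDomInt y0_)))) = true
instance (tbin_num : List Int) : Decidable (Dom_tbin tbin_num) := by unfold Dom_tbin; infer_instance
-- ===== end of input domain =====

-- B replaces A's per-digit 3**(len-l-1) power sum with one Horner pass (alternative algorithm), keeping A's leading-zero guard.

-- ===== PORT A =====
def tbin (tbin_num : List Int) : Int :=
  match tbin_num with
  | [] => 0  -- unreachable under Pre_tbin (Python raises IndexError on [])
  | h :: _ =>
    if h ≠ 0 then
      (List.range tbin_num.length).foldl (fun result l =>
        if tbin_num.getD l 0 = 1 then result + 3 ^ (tbin_num.length - l - 1)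
        else if tbin_num.getD l 0 = 2 then result + 2 * 3 ^ (tbin_num.length - l - 1)
        else result) 0
    else 0

-- ===== PORT B =====
def tbin_alt (tbin_num : List Int) : Int :=
  match tbin_num with
  | [] => 0  -- unreachable under Pre_tbin (Python raises IndexError on [])
  | h :: _ =>
    if h = 0 then 0
    else tbin_num.foldl (fun result d => result * 3 + (if d = 1 ∨ d = 2 then d else 0)) 0

-- ===== PRECONDITION & SPEC =====
-- Pre_ excludes only the empty list, on which A raises IndexError (tbin_num[0]).
def Pre_tbin (tbin_num : List Int) : Prop := tbin_num ≠ []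
instance (tbin_num : List Int) : Decidable (Pre_tbin tbin_num) := by unfold Pre_tbin; infer_instance
def pvWitness_tbin : List Int := [1, 0, 2]
def Spec_tbin (tbin_num : List Int) (out : Int) : Prop := out = tbin_alt tbin_num
instance (tbin_num : List Int) (out : Int) : Decidable (Spec_tbin tbin_num out) := by unfold Spec_tbin; infer_instance

-- ===== CLAIM (what is proved, stated in full; the proofs are below) =====
def Claim_equal_tbin : Prop := ∀ (tbin_num : List Int), Dom_tbin tbin_num → Pre_tbin tbin_num → Spec_tbin tbin_num (tbin tbin_num)

-- ===== LEMMAS AND PROOFS =====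

/-- common digit value: 1 and 2 count as themselves, everything else as 0 -/
def pvCoef (d : Int) : Int := if d = 1 ∨ d = 2 then d else 0

/-- reference value of a ternary digit list -/
def pvVal : List Int → Int
  | [] => 0
  | d :: r => pvCoef d * 3 ^ r.length + pvVal r

theorem horner_eq (t : List Int) (acc : Int) :
    t.foldl (fun result d => result * 3 + (if d = 1 ∨ d = 2 then d else 0)) acc
      = acc * 3 ^ t.length + pvVal t := by
  induction t generalizing acc with
  | nil => simp [pvVal]
  | cons d r ih =>
    simp only [List.foldl_cons, ih, pvVal, pvCoef, List.length_cons]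
    ring

theorem foldl_add_map (c : Nat → Int) (L : List Nat) (acc : Int) :
    L.foldl (fun r l => r + c l) acc = acc + (L.map c).sum := by
  induction L generalizing acc with
  | nil => simp
  | cons x xs ih => simp [ih]; ring

theorem sum_eq (t : List Int) :
    ((List.range t.length).map (fun l =>
        pvCoef (t.getD l 0) * 3 ^ (t.length - l - 1))).sum = pvVal t := by
  induction t with
  | nil => simp [pvVal]
  | cons d r ih =>
    rw [List.length_cons, List.range_succ_eq_map]
    simp only [List.map_cons, List.map_map, List.sum_cons]
    have h2 : ((List.range r.length).map
        (fun l => pvCoef (r.getD l 0) * 3 ^ (r.length - l - 1))).sum = pvVal r := ih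
    simp only [pvVal]
    congr 1
    rw [← h2]
    apply congrArg List.sum
    apply List.map_congr_left
    intro l _
    simp [Function.comp, Nat.succ_sub_succ]

theorem stepA_eq (t : List Int) :
    (fun (result : Int) (l : Nat) =>
        if t.getD l 0 = 1 then result + 3 ^ (t.length - l - 1)
        else if t.getD l 0 = 2 then result + 2 * 3 ^ (t.length - l - 1)
        else result)
      = fun result l => result + pvCoef (t.getD l 0) * 3 ^ (t.length - l - 1) := by
  funext result l
  simp only [pvCoef]
  split_ifs with h1 h2 <;> simp_all

-- ===== VERDICT (by name: the statement is the Claim_ definition above) =====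
theorem tbin_spec : Claim_equal_tbin := by
  intro t _ hpre
  unfold Spec_tbin tbin tbin_alt
  match t with
  | [] => exact absurd rfl hpre
  | h :: r =>
    by_cases h0 : h = 0
    · simp [h0]
    · simp only [h0, ne_eq, not_false_eq_true, if_true, if_false]
      rw [stepA_eq, foldl_add_map, sum_eq, horner_eq]
      simp
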